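-- pv_equiv track=rewrite | github.com/tum-ei-eda/mlonmcu | mlonmcu/models/utils.py | fill_data_source
-- ===== SOURCE A (Python) =====
-- def fill_data_source(in_bufs, out_bufs):
--     out = '#include "ml_interface.h"\n'
--     out += "#include <stddef.h>\n"
--     out += "const int num_data_buffers_in = " + str(sum([len(buf) for buf in in_bufs])) + ";\n"
--     out += "const int num_data_buffers_out = " + str(sum([len(buf) for buf in out_bufs])) + ";\n"
--     for i, buf in enumerate(in_bufs):
--         for j in range(len(buf)):
--             out += "const unsigned char data_buffer_in_" + str(i) + "_" + str(j) + "[] = {" + buf[j] + "};\n"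
--     for i, buf in enumerate(out_bufs):
--         for j in range(len(buf)):
--             out += "const unsigned char data_buffer_out_" + str(i) + "_" + str(j) + "[] = {" + buf[j] + "};\n"
--
--     var_in = "const unsigned char *const data_buffers_in[] = {"
--     var_insz = "const size_t data_size_in[] = {"
--     for i, buf in enumerate(in_bufs):
--         for j in range(len(buf)):
--             var_in += "data_buffer_in_" + str(i) + "_" + str(j) + ", "
--             var_insz += "sizeof(data_buffer_in_" + str(i) + "_" + str(j) + "), "
--     var_out = "const unsigned char *const data_buffers_out[] = {"
--     var_outsz = "const size_t data_size_out[] = {"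
--     for i, buf in enumerate(out_bufs):
--         for j in range(len(buf)):
--             var_out += "data_buffer_out_" + str(i) + "_" + str(j) + ", "
--             var_outsz += "sizeof(data_buffer_out_" + str(i) + "_" + str(j) + "), "
--     out += var_in + "};\n" + var_out + "};\n" + var_insz + "};\n" + var_outsz + "};\n"
--     return out
-- ===== SOURCE B (Python) =====
-- def fill_data_source(in_bufs, out_bufs):
--     # Single fused pass per buffer group: collect declaration, pointer and size
--     # fragments together, then join once at the end (order identical to A's).
--     decls = []
--     ptr_in = []
--     sz_in = []
--     for i, buf in enumerate(in_bufs):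
--         for j in range(len(buf)):
--             name = "data_buffer_in_" + str(i) + "_" + str(j)
--             decls.append("const unsigned char " + name + "[] = {" + buf[j] + "};\n")
--             ptr_in.append(name + ", ")
--             sz_in.append("sizeof(" + name + "), ")
--     ptr_out = []
--     sz_out = []
--     for i, buf in enumerate(out_bufs):
--         for j in range(len(buf)):
--             name = "data_buffer_out_" + str(i) + "_" + str(j)
--             decls.append("const unsigned char " + name + "[] = {" + buf[j] + "};\n")
--             ptr_out.append(name + ", ")
--             sz_out.append("sizeof(" + name + "), ")
--     return (
--         '#include "ml_interface.h"\n'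
--         + "#include <stddef.h>\n"
--         + "const int num_data_buffers_in = " + str(len(ptr_in)) + ";\n"
--         + "const int num_data_buffers_out = " + str(len(ptr_out)) + ";\n"
--         + "".join(decls)
--         + "const unsigned char *const data_buffers_in[] = {" + "".join(ptr_in) + "};\n"
--         + "const unsigned char *const data_buffers_out[] = {" + "".join(ptr_out) + "};\n"
--         + "const size_t data_size_in[] = {" + "".join(sz_in) + "};\n"
--         + "const size_t data_size_out[] = {" + "".join(sz_out) + "};\n"
--     )
-- ===== Notes on version B (the rewrite author's own statement) =====
-- stated objective: alternative
-- what changed: B fuses A's two separate enumerate-passes per buffer group into one pass that collects declaration, pointer and size fragments into lists, derives the two counts as list lengths instead of re-summing, and joins everything once at the end instead of repeated string +=.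
import Mathlib
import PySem

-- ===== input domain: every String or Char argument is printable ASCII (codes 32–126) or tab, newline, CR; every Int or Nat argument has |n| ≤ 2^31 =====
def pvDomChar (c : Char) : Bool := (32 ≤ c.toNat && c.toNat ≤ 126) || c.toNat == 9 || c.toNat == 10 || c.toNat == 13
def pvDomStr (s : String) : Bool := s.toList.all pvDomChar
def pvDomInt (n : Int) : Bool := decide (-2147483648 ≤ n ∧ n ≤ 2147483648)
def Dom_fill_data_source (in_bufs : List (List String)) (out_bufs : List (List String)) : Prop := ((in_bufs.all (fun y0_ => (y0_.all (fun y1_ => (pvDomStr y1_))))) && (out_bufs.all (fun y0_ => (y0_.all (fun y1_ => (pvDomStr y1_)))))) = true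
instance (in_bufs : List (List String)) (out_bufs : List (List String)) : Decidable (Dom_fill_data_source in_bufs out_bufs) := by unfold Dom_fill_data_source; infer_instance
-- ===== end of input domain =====

-- B fuses A's two passes per buffer group into one pass collecting fragment lists joined once;
-- equal return value proved on the whole domain (objective: alternative decomposition, not faster).

-- ===== PORT A =====
-- literal transliteration of A: two string-accumulating nested loops per group,
-- the second pair of loops threading a pair (var_in, var_insz) / (var_out, var_outsz).
def fill_data_source (in_bufs : List (List String)) (out_bufs : List (List String)) : String :=
  let out := "#include \"ml_interface.h\"\n"
  let out := out ++ "#include <stddef.h>\n"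
  let out := out ++ "const int num_data_buffers_in = "
      ++ PySem.Int.toStr ((in_bufs.map (fun buf => PySem.List.len buf)).sum) ++ ";\n"
  let out := out ++ "const int num_data_buffers_out = "
      ++ PySem.Int.toStr ((out_bufs.map (fun buf => PySem.List.len buf)).sum) ++ ";\n"
  let out := (PySem.List.enumerate in_bufs 0).foldl (fun out p =>
      (PySem.List.pyRange 0 (PySem.List.len p.2) 1).foldl (fun out j =>
        out ++ "const unsigned char data_buffer_in_" ++ PySem.Int.toStr p.1 ++ "_"
            ++ PySem.Int.toStr j ++ "[] = {" ++ PySem.List.pyGetD p.2 j "" ++ "};\n") out) out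
  let out := (PySem.List.enumerate out_bufs 0).foldl (fun out p =>
      (PySem.List.pyRange 0 (PySem.List.len p.2) 1).foldl (fun out j =>
        out ++ "const unsigned char data_buffer_out_" ++ PySem.Int.toStr p.1 ++ "_"
            ++ PySem.Int.toStr j ++ "[] = {" ++ PySem.List.pyGetD p.2 j "" ++ "};\n") out) out
  let vi := (PySem.List.enumerate in_bufs 0).foldl (fun vi p =>
      (PySem.List.pyRange 0 (PySem.List.len p.2) 1).foldl (fun (vi : String × String) j =>
        (vi.1 ++ "data_buffer_in_" ++ PySem.Int.toStr p.1 ++ "_" ++ PySem.Int.toStr j ++ ", ",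
         vi.2 ++ "sizeof(data_buffer_in_" ++ PySem.Int.toStr p.1 ++ "_" ++ PySem.Int.toStr j ++ "), ")) vi)
      ("const unsigned char *const data_buffers_in[] = {", "const size_t data_size_in[] = {")
  let vo := (PySem.List.enumerate out_bufs 0).foldl (fun vo p =>
      (PySem.List.pyRange 0 (PySem.List.len p.2) 1).foldl (fun (vo : String × String) j =>
        (vo.1 ++ "data_buffer_out_" ++ PySem.Int.toStr p.1 ++ "_" ++ PySem.Int.toStr j ++ ", ",
         vo.2 ++ "sizeof(data_buffer_out_" ++ PySem.Int.toStr p.1 ++ "_" ++ PySem.Int.toStr j ++ "), ")) vo)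
      ("const unsigned char *const data_buffers_out[] = {", "const size_t data_size_out[] = {")
  out ++ vi.1 ++ "};\n" ++ vo.1 ++ "};\n" ++ vi.2 ++ "};\n" ++ vo.2 ++ "};\n"

-- ===== PORT B =====
-- literal transliteration of B: one pass per group building three fragment lists, joined once.
def fill_data_source_alt (in_bufs : List (List String)) (out_bufs : List (List String)) : String :=
  let stIn := (PySem.List.enumerate in_bufs 0).foldl
      (fun (st : List String × List String × List String) p =>
        (PySem.List.pyRange 0 (PySem.List.len p.2) 1).foldl
          (fun (st : List String × List String × List String) j =>
            let name := "data_buffer_in_" ++ PySem.Int.toStr p.1 ++ "_" ++ PySem.Int.toStr j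
            (st.1 ++ ["const unsigned char " ++ name ++ "[] = {" ++ PySem.List.pyGetD p.2 j "" ++ "};\n"],
             st.2.1 ++ [name ++ ", "],
             st.2.2 ++ ["sizeof(" ++ name ++ "), "])) st)
      ([], [], [])
  let stOut := (PySem.List.enumerate out_bufs 0).foldl
      (fun (st : List String × List String × List String) p =>
        (PySem.List.pyRange 0 (PySem.List.len p.2) 1).foldl
          (fun (st : List String × List String × List String) j =>
            let name := "data_buffer_out_" ++ PySem.Int.toStr p.1 ++ "_" ++ PySem.Int.toStr j
            (st.1 ++ ["const unsigned char " ++ name ++ "[] = {" ++ PySem.List.pyGetD p.2 j "" ++ "};\n"],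
             st.2.1 ++ [name ++ ", "],
             st.2.2 ++ ["sizeof(" ++ name ++ "), "])) st)
      (stIn.1, [], [])
  "#include \"ml_interface.h\"\n"
    ++ "#include <stddef.h>\n"
    ++ "const int num_data_buffers_in = " ++ PySem.Int.toStr (PySem.List.len stIn.2.1) ++ ";\n"
    ++ "const int num_data_buffers_out = " ++ PySem.Int.toStr (PySem.List.len stOut.2.1) ++ ";\n"
    ++ PySem.Str.join "" stOut.1
    ++ "const unsigned char *const data_buffers_in[] = {" ++ PySem.Str.join "" stIn.2.1 ++ "};\n"
    ++ "const unsigned char *const data_buffers_out[] = {" ++ PySem.Str.join "" stOut.2.1 ++ "};\n"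
    ++ "const size_t data_size_in[] = {" ++ PySem.Str.join "" stIn.2.2 ++ "};\n"
    ++ "const size_t data_size_out[] = {" ++ PySem.Str.join "" stOut.2.2 ++ "};\n"

-- ===== PRECONDITION & SPEC =====
def Spec_fill_data_source (in_bufs : List (List String)) (out_bufs : List (List String)) (out : String) : Prop := out = fill_data_source_alt in_bufs out_bufs
instance (in_bufs : List (List String)) (out_bufs : List (List String)) (out : String) : Decidable (Spec_fill_data_source in_bufs out_bufs out) := by unfold Spec_fill_data_source; infer_instance

-- ===== CLAIM (what is proved, stated in full; the proofs are below) =====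
def Claim_equal_fill_data_source : Prop := ∀ (in_bufs : List (List String)) (out_bufs : List (List String)), Dom_fill_data_source in_bufs out_bufs → Spec_fill_data_source in_bufs out_bufs (fill_data_source in_bufs out_bufs)

-- ===== LEMMAS AND PROOFS =====

-- join over "" : structural facts
theorem pvCharsJoinCons (cs : List Char) (ls : List (List Char)) :
    PySem.Chars.join [] (cs :: ls) = cs ++ PySem.Chars.join [] ls := by
  cases ls <;> simp [PySem.Chars.join, List.intercalate]

theorem pvJoinNil : PySem.Str.join "" ([] : List String) = "" := by decide

theorem pvJoinCons (x : String) (xs : List String) :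
    PySem.Str.join "" (x :: xs) = x ++ PySem.Str.join "" xs := by
  rw [← String.toList_inj]
  simp [PySem.Str.join, pvCharsJoinCons]

theorem pvJoinAppend (l1 l2 : List String) :
    PySem.Str.join "" (l1 ++ l2) = PySem.Str.join "" l1 ++ PySem.Str.join "" l2 := by
  induction l1 with
  | nil => simp [pvJoinNil, String.empty_append]
  | cons x xs ih => simp [pvJoinCons, ih, String.append_assoc]

-- a string-accumulating loop is a join of the mapped fragments
theorem pvFoldlStr {β : Type} (l : List β) (f : β → String) (s : String) :
    l.foldl (fun a x => a ++ f x) s = s ++ PySem.Str.join "" (l.map f) := by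
  induction l generalizing s with
  | nil => simp [pvJoinNil, String.append_empty]
  | cons x xs ih => rw [List.foldl_cons, ih, List.map_cons, pvJoinCons, String.append_assoc]

-- nested (outer enumerate / inner range) string-accumulating loops
theorem pvStrFoldl2 {γ β : Type} (l : List γ) (inner : γ → List β) (f : γ → β → String) (s : String) :
    l.foldl (fun out c => (inner c).foldl (fun out j => out ++ f c j) out) s
      = s ++ PySem.Str.join "" (l.flatMap (fun c => (inner c).map (f c))) := by
  induction l generalizing s with
  | nil => simp [pvJoinNil, String.append_empty]
  | cons c cs ih =>
      rw [List.foldl_cons, pvFoldlStr, ih, List.flatMap_cons, pvJoinAppend, String.append_assoc]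

-- the same with a PAIR of string accumulators (A's var/size loops)
theorem pvPairFoldl {β : Type} (l : List β) (f g : β → String) (a b : String) :
    l.foldl (fun (v : String × String) x => (v.1 ++ f x, v.2 ++ g x)) (a, b)
      = (a ++ PySem.Str.join "" (l.map f), b ++ PySem.Str.join "" (l.map g)) := by
  induction l generalizing a b with
  | nil => simp [pvJoinNil, String.append_empty]
  | cons x xs ih => rw [List.foldl_cons, ih]; simp [pvJoinCons, String.append_assoc]

theorem pvPairFoldl2 {γ β : Type} (l : List γ) (inner : γ → List β) (f g : γ → β → String) (a b : String) :
    l.foldl (fun (v : String × String) c =>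
        (inner c).foldl (fun (v : String × String) j => (v.1 ++ f c j, v.2 ++ g c j)) v) (a, b)
      = (a ++ PySem.Str.join "" (l.flatMap (fun c => (inner c).map (f c))),
         b ++ PySem.Str.join "" (l.flatMap (fun c => (inner c).map (g c)))) := by
  induction l generalizing a b with
  | nil => simp [pvJoinNil, String.append_empty]
  | cons c cs ih =>
      rw [List.foldl_cons, pvPairFoldl, ih]
      simp [pvJoinAppend, String.append_assoc]

-- B's TRIPLE of fragment-list accumulators
theorem pvTripleFoldl {α β : Type} (l : List β) (f g h : β → α) (d p z : List α) :
    l.foldl (fun (st : List α × List α × List α) x =>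
        (st.1 ++ [f x], st.2.1 ++ [g x], st.2.2 ++ [h x])) (d, p, z)
      = (d ++ l.map f, p ++ l.map g, z ++ l.map h) := by
  induction l generalizing d p z with
  | nil => simp
  | cons x xs ih => rw [List.foldl_cons, ih]; simp

theorem pvTripleFoldl2 {γ β α : Type} (l : List γ) (inner : γ → List β) (f g h : γ → β → α)
    (d p z : List α) :
    l.foldl (fun (st : List α × List α × List α) c =>
        (inner c).foldl (fun (st : List α × List α × List α) j =>
          (st.1 ++ [f c j], st.2.1 ++ [g c j], st.2.2 ++ [h c j])) st) (d, p, z)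
      = (d ++ l.flatMap (fun c => (inner c).map (f c)),
         p ++ l.flatMap (fun c => (inner c).map (g c)),
         z ++ l.flatMap (fun c => (inner c).map (h c))) := by
  induction l generalizing d p z with
  | nil => simp
  | cons c cs ih => rw [List.foldl_cons, pvTripleFoldl, ih]; simp

-- len of the flattened fragment list IS A's sum of buffer lengths
theorem pvLenFlat (bufs : List (List String)) (f : Int × List String → Int → String) :
    PySem.List.len ((PySem.List.enumerate bufs 0).flatMap
        (fun pr => (PySem.List.pyRange 0 (PySem.List.len pr.2) 1).map (f pr)))
      = (bufs.map (fun b => PySem.List.len b)).sum := by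
  simp only [PySem.List.len_eq, List.length_flatMap, List.length_map,
    PySem.List.length_pyRange_one]
  have h2 : (PySem.List.enumerate bufs 0).map
        (fun pr => ((pr.2.length : Int) - 0).toNat)
      = bufs.map (fun b => b.length) := by
    rw [show (fun pr : Int × List String => ((pr.2.length : Int) - 0).toNat)
          = (fun b : List String => b.length) ∘ (fun pr : Int × List String => pr.2) from by
        funext pr; simp]
    rw [← List.map_map, PySem.List.map_snd_enumerate]
  rw [h2, Nat.cast_list_sum, List.map_map]
  rfl

-- literal-prefix merges (B names the buffer once; A writes the fused literal)
theorem pvLitDeclIn (r : String) :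
    "const unsigned char " ++ ("data_buffer_in_" ++ r) = "const unsigned char data_buffer_in_" ++ r := by
  rw [← String.append_assoc, show ("const unsigned char " ++ "data_buffer_in_") = "const unsigned char data_buffer_in_" from by decide]

theorem pvLitDeclOut (r : String) :
    "const unsigned char " ++ ("data_buffer_out_" ++ r) = "const unsigned char data_buffer_out_" ++ r := by
  rw [← String.append_assoc, show ("const unsigned char " ++ "data_buffer_out_") = "const unsigned char data_buffer_out_" from by decide]

theorem pvLitSzIn (r : String) :
    "sizeof(" ++ ("data_buffer_in_" ++ r) = "sizeof(data_buffer_in_" ++ r := by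
  rw [← String.append_assoc, show ("sizeof(" ++ "data_buffer_in_") = "sizeof(data_buffer_in_" from by decide]

theorem pvLitSzOut (r : String) :
    "sizeof(" ++ ("data_buffer_out_" ++ r) = "sizeof(data_buffer_out_" ++ r := by
  rw [← String.append_assoc, show ("sizeof(" ++ "data_buffer_out_") = "sizeof(data_buffer_out_" from by decide]

-- ===== VERDICT (by name: the statement is the Claim_ definition above) =====
theorem fill_data_source_spec : Claim_equal_fill_data_source := by
  intro in_bufs out_bufs _
  unfold Spec_fill_data_source
  simp only [fill_data_source, fill_data_source_alt, String.append_assoc]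
  simp only [pvTripleFoldl2, pvStrFoldl2, pvPairFoldl2]
  simp only [List.nil_append, pvJoinAppend, pvLenFlat, pvLitDeclIn, pvLitDeclOut,
    pvLitSzIn, pvLitSzOut, String.append_assoc]
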